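-- pv_equiv track=rewrite | github.com/LiamBush5/EPA | EPA-analysis/match_comments_to_sections.py | build_section_hierarchy
-- ===== SOURCE A (Python) =====
-- def build_section_hierarchy(sections):
--     """Build a map of section hierarchy relationships"""
--     # Create a map of section_id to its details
--     section_map = {section['section_id']: section for section in sections}
--
--     # Create parent-child relationships map
--     parent_child_map = {}
--     for section in sections:
--         section_id = section['section_id']
--         parent_id = section.get('parent_section_id')
--
--         if parent_id:
--             if parent_id not in parent_child_map:
--                 parent_child_map[parent_id] = []
--             parent_child_map[parent_id].append(section_id)
--
--     # Build a map of each section to all its ancestors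
--     ancestor_map = {}
--
--     def get_ancestors(section_id):
--         """Recursively get all ancestors for a section"""
--         if section_id in ancestor_map:
--             return ancestor_map[section_id]
--
--         ancestors = []
--         section = section_map.get(section_id)
--         if not section:
--             return []
--
--         parent_id = section.get('parent_section_id')
--         if parent_id:
--             ancestors.append(parent_id)
--             ancestors.extend(get_ancestors(parent_id))
--
--         ancestor_map[section_id] = ancestors
--         return ancestors
--
--     # Populate ancestor map for all sections
--     for section_id in section_map:
--         if section_id not in ancestor_map:
--             ancestor_map[section_id] = get_ancestors(section_id)
--
--     return section_map, parent_child_map, ancestor_map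
-- ===== SOURCE B (Python) =====
-- def build_section_hierarchy(sections):
--     """Build a map of section hierarchy relationships (iterative ancestor walk)"""
--     section_map = {section['section_id']: section for section in sections}
--
--     parent_child_map = {}
--     for section in sections:
--         section_id = section['section_id']
--         parent_id = section.get('parent_section_id')
--         if parent_id:
--             if parent_id not in parent_child_map:
--                 parent_child_map[parent_id] = []
--             parent_child_map[parent_id].append(section_id)
--
--     # Iterative two-phase ancestor computation: walk up collecting the uncached
--     # chain, then fill ancestor lists from the top of the chain down.
--     ancestor_map = {}
--     for sid in section_map:
--         if sid in ancestor_map: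
--             continue
--         chain = []
--         cur = sid
--         while cur is not None and cur not in ancestor_map and cur in section_map:
--             chain.append(cur)
--             cur = section_map[cur].get('parent_section_id') or None
--         while chain:
--             s = chain.pop()
--             p = section_map[s].get('parent_section_id')
--             if p:
--                 ancestor_map[s] = [p] + ancestor_map.get(p, [])
--             else:
--                 ancestor_map[s] = []
--     return section_map, parent_child_map, ancestor_map
-- ===== Notes on version B (the rewrite author's own statement) =====
-- stated objective: alternative
-- what changed: The memoized recursive get_ancestors helper of A is replaced by an explicit iterative two-phase walk per section: a while loop collects the uncached parent chain onto a stack, then a second loop pops it, filling each ancestor list from the already-filled list of the parent; no recursion and no nested helper function.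
import Mathlib
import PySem

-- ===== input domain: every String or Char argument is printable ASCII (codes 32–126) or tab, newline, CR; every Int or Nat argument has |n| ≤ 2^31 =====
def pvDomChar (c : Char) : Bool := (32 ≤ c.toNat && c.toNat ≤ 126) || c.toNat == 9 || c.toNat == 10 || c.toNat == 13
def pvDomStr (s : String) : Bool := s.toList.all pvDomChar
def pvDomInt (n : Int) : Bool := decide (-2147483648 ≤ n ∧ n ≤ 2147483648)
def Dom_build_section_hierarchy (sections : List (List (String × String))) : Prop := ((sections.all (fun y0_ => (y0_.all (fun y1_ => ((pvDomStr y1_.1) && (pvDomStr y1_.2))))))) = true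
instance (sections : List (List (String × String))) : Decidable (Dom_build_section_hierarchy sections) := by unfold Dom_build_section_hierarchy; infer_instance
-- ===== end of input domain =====

-- B replaces A's memoized recursive get_ancestors helper by an explicit iterative
-- two-phase walk (collect the uncached parent chain, then fill top-down); alternative
-- decomposition, same cost.


-- ===== COMMON HELPERS (identical Python lines in A and B) =====
-- a section dict (Python dict → assoc list input) as a PySem.Dict; section.get(k)
def pvGet (sec : List (String × String)) (k : String) : Option String :=
  (PySem.Dict.ofList sec).get? k

-- section['section_id']; raises KeyError when absent — excluded by Pre_
def pvSid (sec : List (String × String)) : String := (pvGet sec "section_id").getD ""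

-- parent_id = section.get('parent_section_id') combined with Python truthiness 'if parent_id:' ("" is falsy)
def pvParent (sec : List (String × String)) : Option String :=
  match pvGet sec "parent_section_id" with
  | none => none
  | some p => if p = "" then none else some p

-- section_map = {section['section_id']: section for section in sections}
def pvSectionMap (sections : List (List (String × String))) :
    PySem.Dict String (List (String × String)) :=
  sections.foldl (fun d sec => d.insert (pvSid sec) sec) PySem.Dict.empty

-- the parent_child_map loop (same lines in A and B)
def pvParentChild (sections : List (List (String × String))) :
    PySem.Dict String (List String) :=
  sections.foldl (fun d sec =>
    match pvParent sec with
    | none => d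
    | some p =>
        let d := if d.contains p then d else d.insert p []
        d.modify p [] (fun l => l ++ [pvSid sec])) PySem.Dict.empty

-- ===== PORT A =====
-- get_ancestors: memoized recursion; fuel (size+1) only makes the recursion total,
-- Pre_ guarantees it is never exhausted
def pvGetAncestors (smap : PySem.Dict String (List (String × String))) :
    Nat → PySem.Dict String (List String) → String →
    (List String × PySem.Dict String (List String))
  | 0, m, _ => ([], m)
  | fuel + 1, m, sid =>
      match m.get? sid with
      | some a => (a, m)
      | none =>
          match smap.get? sid with
          | none => ([], m)
          | some sec =>
              match pvParent sec with
              | none => ([], m.insert sid [])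
              | some p =>
                  let r := pvGetAncestors smap fuel m p
                  (p :: r.1, r.2.insert sid (p :: r.1))

def build_section_hierarchy (sections : List (List (String × String))) :
    (List (String × List (String × String))) × (List (String × List String)) × (List (String × List String)) :=
  let smap := pvSectionMap sections
  let pcm := pvParentChild sections
  let amap := smap.keys.foldl (fun m sid =>
      if m.contains sid then m
      else
        let r := pvGetAncestors smap (smap.size + 1) m sid
        r.2.insert sid r.1) PySem.Dict.empty
  (smap.items, pcm.items, amap.items)

-- ===== PORT B =====
-- phase 1: the while loop collecting the uncached parent chain (fuel = size+1 makes it total)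
def pvWalk (smap : PySem.Dict String (List (String × String)))
    (m : PySem.Dict String (List String)) :
    Nat → Option String → List String
  | 0, _ => []
  | _ + 1, none => []
  | fuel + 1, some c =>
      if m.contains c then []
      else
        match smap.get? c with
        | none => []
        | some sec => c :: pvWalk smap m fuel (pvParent sec)

-- phase 2 body: one 'chain.pop()' step of the fill loop
def pvFillStep (smap : PySem.Dict String (List (String × String)))
    (m : PySem.Dict String (List String)) (s : String) :
    PySem.Dict String (List String) :=
  match smap.get? s with
  | none => m
  | some sec =>
      match pvParent sec with
      | none => m.insert s []
      | some p => m.insert s (p :: m.getD p [])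

-- phase 2: 'while chain: s = chain.pop(); …' processes the chain back to front
def pvFill (smap : PySem.Dict String (List (String × String)))
    (m : PySem.Dict String (List String)) (chain : List String) :
    PySem.Dict String (List String) :=
  chain.reverse.foldl (pvFillStep smap) m

def build_section_hierarchy_alt (sections : List (List (String × String))) :
    (List (String × List (String × String))) × (List (String × List String)) × (List (String × List String)) :=
  let smap := pvSectionMap sections
  let pcm := pvParentChild sections
  let amap := smap.keys.foldl (fun m sid =>
      if m.contains sid then m
      else pvFill smap m (pvWalk smap m (smap.size + 1) (some sid))) PySem.Dict.empty
  (smap.items, pcm.items, amap.items)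

-- ===== PRECONDITION & SPEC =====
-- one step up the parent graph induced by section_map
def pvStep (smap : PySem.Dict String (List (String × String))) :
    Option String → Option String
  | none => none
  | some c =>
      match smap.get? c with
      | none => none
      | some sec => pvParent sec

-- Pre_ excludes sections without a 'section_id' key (A raises KeyError) and cyclic
-- parent chains (A's unbounded recursion raises RecursionError; B's while loop diverges):
-- every parent chain must reach a root within size+1 steps, which is exactly acyclicity.
def Pre_build_section_hierarchy (sections : List (List (String × String))) : Prop :=
  (∀ sec ∈ sections, (pvGet sec "section_id").isSome = true) ∧
  (∀ sid ∈ (pvSectionMap sections).keys,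
      (pvStep (pvSectionMap sections))^[(pvSectionMap sections).size + 1] (some sid) = none)

instance (sections : List (List (String × String))) : Decidable (Pre_build_section_hierarchy sections) := by
  unfold Pre_build_section_hierarchy; infer_instance

def pvWitness_build_section_hierarchy : (List (List (String × String))) :=
  [[("section_id", "a")], [("section_id", "b"), ("parent_section_id", "a")]]

def Spec_build_section_hierarchy (sections : List (List (String × String))) (out : (List (String × List (String × String))) × (List (String × List String)) × (List (String × List String))) : Prop := out = build_section_hierarchy_alt sections
instance (sections : List (List (String × String))) (out : (List (String × List (String × String))) × (List (String × List String)) × (List (String × List String))) : Decidable (Spec_build_section_hierarchy sections out) := by unfold Spec_build_section_hierarchy; infer_instance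

-- ===== CLAIM (what is proved, stated in full; the proofs are below) =====
def Claim_equal_build_section_hierarchy : Prop := ∀ (sections : List (List (String × String))), Dom_build_section_hierarchy sections → Pre_build_section_hierarchy sections → Spec_build_section_hierarchy sections (build_section_hierarchy sections)

-- ===== LEMMAS AND PROOFS =====

-- every key of the memo is a key of section_map
def pvInv (smap : PySem.Dict String (List (String × String)))
    (m : PySem.Dict String (List String)) : Prop :=
  ∀ k, m.contains k = true → smap.contains k = true

-- the value A's get_ancestors returns, read off the filled memo
def pvVal (smap : PySem.Dict String (List (String × String)))
    (m : PySem.Dict String (List String)) (c : String) : List String :=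
  if smap.contains c then m.getD c [] else []

theorem pvInv_fillStep (smap : PySem.Dict String (List (String × String)))
    (m : PySem.Dict String (List String)) (s : String) (h : pvInv smap m) :
    pvInv smap (pvFillStep smap m s) := by
  unfold pvFillStep
  rcases hs : smap.get? s with _ | sec
  · exact h
  · have hcs : smap.contains s = true := by
      rw [PySem.Dict.contains_eq_isSome_get?, hs]; rfl
    have key : ∀ v : List String, pvInv smap (m.insert s v) := by
      intro v k hk
      rw [PySem.Dict.contains_insert] at hk
      rcases Bool.or_eq_true_iff.mp hk with h1 | h2
      · have : k = s := by simpa using h1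
        subst this; exact hcs
      · exact h k h2
    rcases hp : pvParent sec with _ | p <;> simp only [hp]
    · exact key []
    · exact key _

theorem pvInv_fill (smap : PySem.Dict String (List (String × String)))
    (m : PySem.Dict String (List String)) (chain : List String) (h : pvInv smap m) :
    pvInv smap (pvFill smap m chain) := by
  unfold pvFill
  generalize chain.reverse = l
  induction l generalizing m with
  | nil => exact h
  | cons x xs ih => exact ih _ (pvInv_fillStep smap m x h)

theorem pvWalk_none (smap : PySem.Dict String (List (String × String)))
    (m : PySem.Dict String (List String)) (fuel : Nat) :
    pvWalk smap m fuel none = [] := by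
  cases fuel <;> rfl

-- the main invariant: A's memoized recursion computes exactly B's walk-then-fill,
-- and when it really computes (uncached smap member) the memo ends with that insert
theorem pvAnc_main (smap : PySem.Dict String (List (String × String))) :
    ∀ (fuel : Nat) (m : PySem.Dict String (List String)) (c : String),
      pvInv smap m → (pvStep smap)^[fuel] (some c) = none →
      pvGetAncestors smap fuel m c =
        (pvVal smap (pvFill smap m (pvWalk smap m fuel (some c))) c,
         pvFill smap m (pvWalk smap m fuel (some c))) ∧
      (m.contains c = false → (smap.get? c).isSome = true →
        ∃ (M₁ : PySem.Dict String (List String)) (v : List String), pvFill smap m (pvWalk smap m fuel (some c)) = M₁.insert c v ∧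
          pvVal smap (pvFill smap m (pvWalk smap m fuel (some c))) c = v) := by
  intro fuel
  induction fuel with
  | zero => intro m c _ hit; simp at hit
  | succ fuel ih =>
    intro m c hInv hit
    by_cases hm : m.contains c = true
    · -- cached: A returns the memoized value, B's walk is empty
      have hsome : (m.get? c).isSome = true := by
        rw [← PySem.Dict.contains_eq_isSome_get?]; exact hm
      obtain ⟨a, ha⟩ := Option.isSome_iff_exists.mp hsome
      have hw : pvWalk smap m (fuel + 1) (some c) = [] := by
        simp [pvWalk, hm]
      have hcs : smap.contains c = true := hInv c hm
      constructor
      · simp only [pvGetAncestors, ha, hw, pvFill, List.reverse_nil, List.foldl_nil,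
          pvVal, hcs, if_pos]
        rw [PySem.Dict.getD_of_get?_eq_some (h := ha)]
      · intro hf _; rw [hf] at hm; exact absurd hm (by simp)
    · have hm' : m.contains c = false := by simpa using hm
      have hget : m.get? c = none := by
        rw [PySem.Dict.get?_eq_none_iff_contains]; exact hm'
      rcases hs : smap.get? c with _ | sec
      · -- section missing from section_map: both return [] and leave the memo alone
        have hw : pvWalk smap m (fuel + 1) (some c) = [] := by
          simp [pvWalk, hm', hs]
        have hcs : smap.contains c = false := by
          rw [PySem.Dict.contains_eq_isSome_get?, hs]; rfl
        constructor
        · simp [pvGetAncestors, hget, hs, hw, pvFill, pvVal, hcs]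
        · intro _ hsm; exact absurd hsm (by simp)
      · have hcs : smap.contains c = true := by
          rw [PySem.Dict.contains_eq_isSome_get?, hs]; rfl
        rcases hp : pvParent sec with _ | p
        · -- root section: ancestors = []
          have hw : pvWalk smap m (fuel + 1) (some c) = [c] := by
            simp [pvWalk, hm', hs, hp, pvWalk_none]
          have hfill : pvFill smap m [c] = m.insert c [] := by
            simp [pvFill, pvFillStep, hs, hp]
          have hval : pvVal smap (m.insert c []) c = [] := by
            simp [pvVal, hcs, PySem.Dict.getD_insert_self]
          constructor
          · simp only [pvGetAncestors, hget, hs, hp, hw, hfill, hval]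
          · intro _ _; exact ⟨m, [], by rw [hw, hfill], by rw [hw, hfill, hval]⟩
        · -- recursive case
          have hstep : pvStep smap (some c) = some p := by simp [pvStep, hs, hp]
          have hit' : (pvStep smap)^[fuel] (some p) = none := by
            rw [Function.iterate_succ_apply, hstep] at hit; exact hit
          obtain ⟨ihEq, -⟩ := ih m p hInv hit'
          have hInvM₁ : pvInv smap (pvFill smap m (pvWalk smap m fuel (some p))) :=
            pvInv_fill smap m _ hInv
          set M₁ := pvFill smap m (pvWalk smap m fuel (some p)) with hM₁
          have hvp : pvVal smap M₁ p = M₁.getD p [] := by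
            by_cases hcp : smap.contains p = true
            · simp [pvVal, hcp]
            · have hmp : M₁.contains p = false := by
                by_contra hmp
                exact hcp (hInvM₁ p (by simpa using hmp))
              simp [pvVal, hcp, PySem.Dict.getD_of_not_contains (h := hmp)]
          have hw : pvWalk smap m (fuel + 1) (some c) =
              c :: pvWalk smap m fuel (some p) := by
            simp [pvWalk, hm', hs, hp]
          have hfill : pvFill smap m (pvWalk smap m (fuel + 1) (some c)) =
              M₁.insert c (p :: M₁.getD p []) := by
            rw [hw]
            show (c :: pvWalk smap m fuel (some p)).reverse.foldl (pvFillStep smap) m =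
              M₁.insert c (p :: M₁.getD p [])
            rw [List.reverse_cons, List.foldl_append]
            show pvFillStep smap M₁ c = M₁.insert c (p :: M₁.getD p [])
            simp [pvFillStep, hs, hp]
          have hA : pvGetAncestors smap (fuel + 1) m c =
              (p :: pvVal smap M₁ p, M₁.insert c (p :: pvVal smap M₁ p)) := by
            simp only [pvGetAncestors, hget, hs, hp, ihEq]
          have hval : pvVal smap (M₁.insert c (p :: M₁.getD p [])) c =
              p :: M₁.getD p [] := by
            simp [pvVal, hcs, PySem.Dict.getD_insert_self]
          constructor
          · rw [hA, hfill, hval, hvp]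
          · intro _ _
            exact ⟨M₁, p :: M₁.getD p [], by rw [hfill], by rw [hfill, hval]⟩

theorem pvOuter (smap : PySem.Dict String (List (String × String))) :
    ∀ (ks : List String) (m : PySem.Dict String (List String)),
      pvInv smap m →
      (∀ sid ∈ ks, (smap.get? sid).isSome = true ∧
        (pvStep smap)^[smap.size + 1] (some sid) = none) →
      ks.foldl (fun m sid =>
          if m.contains sid then m
          else
            let r := pvGetAncestors smap (smap.size + 1) m sid
            r.2.insert sid r.1) m =
      ks.foldl (fun m sid =>
          if m.contains sid then m
          else pvFill smap m (pvWalk smap m (smap.size + 1) (some sid))) m := by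
  intro ks
  induction ks with
  | nil => intro m _ _; rfl
  | cons sid ks ih =>
    intro m hInv hks
    obtain ⟨hsome, hit⟩ := hks sid (by simp)
    have hks' := fun s hs => hks s (List.mem_cons_of_mem _ hs)
    simp only [List.foldl_cons]
    by_cases hm : m.contains sid = true
    · simp only [hm, if_true]
      exact ih m hInv hks'
    · have hm' : m.contains sid = false := by simpa using hm
      obtain ⟨hEq, hLast⟩ := pvAnc_main smap (smap.size + 1) m sid hInv hit
      obtain ⟨M₁, v, hM, hv⟩ := hLast hm' hsome
      set M := pvFill smap m (pvWalk smap m (smap.size + 1) (some sid)) with hMdef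
      have hstepA :
          (let r := pvGetAncestors smap (smap.size + 1) m sid
           r.2.insert sid r.1) = M := by
        simp only [hEq]
        rw [hv, hM, PySem.Dict.insert_insert_self]
      simp only [hm', if_neg, Bool.false_eq_true, not_false_iff, hstepA]
      exact ih M (pvInv_fill smap m _ hInv) hks'

-- ===== VERDICT (by name: the statement is the Claim_ definition above) =====
theorem build_section_hierarchy_spec : Claim_equal_build_section_hierarchy := by
  intro sections _ hpre
  obtain ⟨-, hacyc⟩ := hpre
  have hfold := pvOuter (pvSectionMap sections) (pvSectionMap sections).keys
    PySem.Dict.empty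
    (by intro k hk; simp [PySem.Dict.contains_empty] at hk)
    (by
      intro sid hsid
      refine ⟨?_, hacyc sid hsid⟩
      rw [← PySem.Dict.contains_eq_isSome_get?]
      exact (PySem.Dict.contains_iff_mem_keys _ _).mpr hsid)
  simp only [Spec_build_section_hierarchy, build_section_hierarchy,
    build_section_hierarchy_alt, hfold]
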